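-- pv_equiv track=rewrite | github.com/fadamsyah/learn-api-iot | src/dht-api-data.py | find_start_and_end_index
-- ===== SOURCE A (Python) =====
-- def find_start_and_end_index(list_time, t_start, t_end):
--     if (t_end >= list_time[-1]):
--         i_end = len(list_time)
--     elif (t_end < list_time[0]):
--         i_end = None
--     elif (t_end == list_time[0]):
--         i_end = 1
--     else:
--         for i in list(reversed(range(len(list_time)))):
--             if (t_end >= list_time[i]):
--                 i_end = i
--                 break
--
--     if (t_start <= list_time[0]):
--         i_start = 0
--     elif (t_start > list_time[-1]):
--         i_start = None
--     elif (t_start == list_time[-1]):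
--         i_start = len(list_time) - 1
--     else:
--         for i in list(reversed(range(i_end))):
--             if (t_start >= list_time[i]):
--                 i_start = i
--                 break
--
--     return i_start, i_end
-- ===== SOURCE B (Python) =====
-- def find_start_and_end_index(list_time, t_start, t_end):
--     n = len(list_time)
--     first = list_time[0]
--     last = list_time[-1]
--
--     def last_at_most(t, hi):
--         # greatest index i < hi with list_time[i] <= t (None if there is none),
--         # found by a single forward pass keeping the last match
--         best = None
--         for i in range(hi):
--             if list_time[i] <= t:
--                 best = i
--         return best
--
--     if t_end >= last:
--         i_end = n
--     elif t_end < first: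
--         i_end = None
--     elif t_end == first:
--         i_end = 1
--     else:
--         i_end = last_at_most(t_end, n)
--
--     if t_start <= first:
--         i_start = 0
--     elif t_start > last:
--         i_start = None
--     elif t_start == last:
--         i_start = n - 1
--     else:
--         i_start = last_at_most(t_start, n if i_end is None else i_end)
--
--     return i_start, i_end
-- ===== Notes on version B (the rewrite author's own statement) =====
-- stated objective: alternative
-- what changed: Replaces A's two reversed break-out index scans (whose fall-through paths leave variables unbound or pass None to range) by one shared forward 'last index with value <= t' helper that keeps the last match in an accumulator and returns None gracefully.
-- crash fix: On nonempty lists with t_start strictly between the first and last sample, A raises TypeError (range(None)) when t_end is below all samples and UnboundLocalError when only the first sample is <= t_end; B returns the natural last-index-at-most answer ((i_start_or_None, i_end)) there. — e.g. on find_start_and_end_index([0, 5], 1, 3): A raises UnboundLocalError, B returns (none, some 0)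
import Mathlib
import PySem

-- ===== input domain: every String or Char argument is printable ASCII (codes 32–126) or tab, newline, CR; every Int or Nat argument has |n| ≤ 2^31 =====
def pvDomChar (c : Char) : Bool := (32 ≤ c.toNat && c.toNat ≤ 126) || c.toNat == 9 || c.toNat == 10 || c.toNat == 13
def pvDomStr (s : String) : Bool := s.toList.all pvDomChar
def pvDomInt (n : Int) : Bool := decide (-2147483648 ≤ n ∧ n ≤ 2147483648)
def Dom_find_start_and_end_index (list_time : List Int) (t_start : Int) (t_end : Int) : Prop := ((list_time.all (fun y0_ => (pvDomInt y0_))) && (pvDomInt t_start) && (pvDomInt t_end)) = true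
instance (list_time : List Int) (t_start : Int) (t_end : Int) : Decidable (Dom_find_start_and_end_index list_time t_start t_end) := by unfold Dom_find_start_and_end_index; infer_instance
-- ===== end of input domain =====

-- B replaces A's two reversed break-out scans by a shared forward "last index with value ≤ t"
-- pass with an accumulator (alternative decomposition, same O(n) cost; return value only).

-- ===== PORT A =====
-- for i in list(reversed(range(…))): if t >= list_time[i]: i_end = i; break
-- (the caller passes the reversed index list; a fall-through leaves the variable unbound in
-- Python, i.e. the function raises there — those inputs are excluded by Pre_, we return none)
def scanRev (xs : List Int) (t : Int) : List Int → Option Int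
  | [] => none
  | i :: rest => if t ≥ (PySem.List.pyGet? xs i).getD 0 then some i else scanRev xs t rest

-- literal port of A; list_time[-1]/list_time[0] on the empty list raise IndexError in Python
-- (excluded by Pre_), here .getD 0
def find_start_and_end_index (list_time : List Int) (t_start : Int) (t_end : Int) : Option Int × Option Int :=
  let i_end : Option Int :=
    if t_end ≥ (PySem.List.pyGet? list_time (-1)).getD 0 then some (list_time.length : Int)
    else if t_end < (PySem.List.pyGet? list_time 0).getD 0 then none
    else if t_end = (PySem.List.pyGet? list_time 0).getD 0 then some 1
    else scanRev list_time t_end ((PySem.List.pyRange 0 (list_time.length : Int) 1).reverse)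
  let i_start : Option Int :=
    if t_start ≤ (PySem.List.pyGet? list_time 0).getD 0 then some 0
    else if t_start > (PySem.List.pyGet? list_time (-1)).getD 0 then none
    else if t_start = (PySem.List.pyGet? list_time (-1)).getD 0 then some ((list_time.length : Int) - 1)
    else match i_end with
         | none => none  -- Python raises TypeError (range(None)) here; excluded by Pre_
         | some k => scanRev list_time t_start ((PySem.List.pyRange 0 k 1).reverse)
  (i_start, i_end)

-- ===== PORT B =====
-- best = None; for i in range(hi): if list_time[i] <= t: best = i
def lastAtMost (xs : List Int) (t : Int) (hi : Int) : Option Int :=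
  (PySem.List.pyRange 0 hi 1).foldl
    (fun best i => if (PySem.List.pyGet? xs i).getD 0 ≤ t then some i else best) none

def find_start_and_end_index_alt (list_time : List Int) (t_start : Int) (t_end : Int) : Option Int × Option Int :=
  let n : Int := (list_time.length : Int)
  let first : Int := (PySem.List.pyGet? list_time 0).getD 0
  let last : Int := (PySem.List.pyGet? list_time (-1)).getD 0
  let i_end : Option Int :=
    if t_end ≥ last then some n
    else if t_end < first then none
    else if t_end = first then some 1
    else lastAtMost list_time t_end n
  let i_start : Option Int :=
    if t_start ≤ first then some 0
    else if t_start > last then none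
    else if t_start = last then some (n - 1)
    else lastAtMost list_time t_start (match i_end with | none => n | some k => k)
  (i_start, i_end)

-- ===== PRECONDITION & SPEC =====
-- Pre_ excludes exactly the inputs on which the Python A raises: the empty list (IndexError),
-- the inputs where i_end is None but the i_start search loop is reached (TypeError on
-- range(None)), and the inputs where that search loop runs over range(0) and leaves i_start
-- unbound (UnboundLocalError).
def Pre_find_start_and_end_index (list_time : List Int) (t_start : Int) (t_end : Int) : Prop :=
  list_time ≠ [] ∧
  ¬ (t_end < list_time.headI ∧ list_time.headI < t_start ∧ t_start < list_time.getLastD 0) ∧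
  ¬ (list_time.headI < t_end ∧ t_end < list_time.getLastD 0 ∧ (∀ v ∈ list_time.tail, t_end < v) ∧
     list_time.headI < t_start ∧ t_start < list_time.getLastD 0)
instance (list_time : List Int) (t_start : Int) (t_end : Int) : Decidable (Pre_find_start_and_end_index list_time t_start t_end) := by unfold Pre_find_start_and_end_index; infer_instance

def pvWitness_find_start_and_end_index : List Int × Int × Int := ([1, 3, 5, 7], 2, 6)

def Spec_find_start_and_end_index (list_time : List Int) (t_start : Int) (t_end : Int) (out : Option Int × Option Int) : Prop := out = find_start_and_end_index_alt list_time t_start t_end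
instance (list_time : List Int) (t_start : Int) (t_end : Int) (out : Option Int × Option Int) : Decidable (Spec_find_start_and_end_index list_time t_start t_end out) := by unfold Spec_find_start_and_end_index; infer_instance

-- On a nonempty list with t_start strictly between the ends, A raises (TypeError when t_end is
-- below all samples, UnboundLocalError when only the first sample is ≤ t_end); B returns the
-- natural "last index with value ≤ t" answer there.
def Raises_find_start_and_end_index (list_time : List Int) (t_start : Int) (t_end : Int) : Prop :=
  list_time ≠ [] ∧
  ((t_end < list_time.headI ∧ list_time.headI < t_start ∧ t_start < list_time.getLastD 0) ∨
   (list_time.headI < t_end ∧ t_end < list_time.getLastD 0 ∧ (∀ v ∈ list_time.tail, t_end < v) ∧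
    list_time.headI < t_start ∧ t_start < list_time.getLastD 0))
instance (list_time : List Int) (t_start : Int) (t_end : Int) : Decidable (Raises_find_start_and_end_index list_time t_start t_end) := by unfold Raises_find_start_and_end_index; infer_instance
def pvRaiseWitness_find_start_and_end_index : List Int × Int × Int := ([0, 5], 1, 3)
def pvRaiseWitnessOut_find_start_and_end_index : Option Int × Option Int := (none, some 0)

-- ===== CLAIM (what is proved, stated in full; the proofs are below) =====
def Claim_equal_find_start_and_end_index : Prop := ∀ (list_time : List Int) (t_start : Int) (t_end : Int), Dom_find_start_and_end_index list_time t_start t_end → Pre_find_start_and_end_index list_time t_start t_end → Spec_find_start_and_end_index list_time t_start t_end (find_start_and_end_index list_time t_start t_end)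

def Claim_raises_find_start_and_end_index : Prop := (∀ (list_time : List Int) (t_start : Int) (t_end : Int), Dom_find_start_and_end_index list_time t_start t_end → Raises_find_start_and_end_index list_time t_start t_end → ¬ Pre_find_start_and_end_index list_time t_start t_end) ∧ (Dom_find_start_and_end_index (pvRaiseWitness_find_start_and_end_index.1) (pvRaiseWitness_find_start_and_end_index.2.1) (pvRaiseWitness_find_start_and_end_index.2.2) ∧ Raises_find_start_and_end_index (pvRaiseWitness_find_start_and_end_index.1) (pvRaiseWitness_find_start_and_end_index.2.1) (pvRaiseWitness_find_start_and_end_index.2.2) ∧ find_start_and_end_index_alt (pvRaiseWitness_find_start_and_end_index.1) (pvRaiseWitness_find_start_and_end_index.2.1) (pvRaiseWitness_find_start_and_end_index.2.2) = pvRaiseWitnessOut_find_start_and_end_index)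

-- ===== LEMMAS AND PROOFS =====

-- A's reversed break-scan is List.find? on the index list
lemma scanRev_eq_find? (xs : List Int) (t : Int) (l : List Int) :
    scanRev xs t l = l.find? (fun i => decide ((PySem.List.pyGet? xs i).getD 0 ≤ t)) := by
  induction l with
  | nil => rfl
  | cons a r ih =>
      simp only [scanRev, ge_iff_le, List.find?]
      by_cases h : (PySem.List.pyGet? xs a).getD 0 ≤ t <;> simp [h, ih]

-- B's forward keep-last fold is List.find? on the reversed index list
lemma foldl_keepLast (p : Int → Bool) (l : List Int) (acc : Option Int) :
    l.foldl (fun best i => if p i then some i else best) acc = (l.reverse.find? p).or acc := by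
  induction l generalizing acc with
  | nil => rfl
  | cons a r ih =>
      simp only [List.foldl_cons, ih, List.reverse_cons, List.find?_append]
      cases h : r.reverse.find? p <;> by_cases hp : p a <;> simp [List.find?, hp, Option.or]

lemma loops_eq (xs : List Int) (t : Int) (k : Int) :
    scanRev xs t ((PySem.List.pyRange 0 k 1).reverse) = lastAtMost xs t k := by
  have := foldl_keepLast (fun i => decide ((PySem.List.pyGet? xs i).getD 0 ≤ t))
    (PySem.List.pyRange 0 k 1) none
  simp only [lastAtMost, decide_eq_true_eq] at this ⊢
  rw [this, scanRev_eq_find?]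
  cases ((PySem.List.pyRange 0 k 1).reverse.find?
      (fun i => decide ((PySem.List.pyGet? xs i).getD 0 ≤ t))) <;> simp [Option.or]

-- in the generic i_end branch the reversed scan always finds index 0
lemma scanRev_ne_none (xs : List Int) (t : Int) (hne : xs ≠ [])
    (h0 : (PySem.List.pyGet? xs 0).getD 0 ≤ t) :
    scanRev xs t ((PySem.List.pyRange 0 (xs.length : Int) 1).reverse) ≠ none := by
  rw [scanRev_eq_find?]
  intro hnone
  rw [List.find?_eq_none] at hnone
  have hmem : (0 : Int) ∈ (PySem.List.pyRange 0 (xs.length : Int) 1).reverse := by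
    rw [List.mem_reverse, PySem.List.mem_pyRange_one]
    have : 0 < xs.length := List.length_pos_of_ne_nil hne
    omega
  have := hnone 0 hmem
  simp [h0] at this

-- ===== VERDICT (by name: the statement is the Claim_ definition above) =====
theorem find_start_and_end_index_spec : Claim_equal_find_start_and_end_index := by
  intro xs ts te _ hPre
  obtain ⟨hne, hc2, hc3⟩ := hPre
  have hfirst : (PySem.List.pyGet? xs 0).getD 0 = xs.headI := by
    rw [PySem.List.pyGet?_zero]; cases xs <;> simp
  have hlast : (PySem.List.pyGet? xs (-1)).getD 0 = xs.getLast?.getD 0 := by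
    rw [PySem.List.pyGet?_neg_one]
  simp only [List.getLastD_eq_getLast?] at hc2 hc3
  unfold Spec_find_start_and_end_index find_start_and_end_index find_start_and_end_index_alt
  simp only [loops_eq, hfirst, hlast]
  by_cases h1 : ts ≤ xs.headI
  · simp [h1]
  by_cases h2 : ts > xs.getLast?.getD 0
  · simp [h1, h2]
  by_cases h3 : ts = xs.getLast?.getD 0
  · simp [h3]
  -- generic i_start branch: first < ts < last, so i_end cannot be none
  have hts1 : xs.headI < ts := by omega
  have hts2 : ts < xs.getLast?.getD 0 := by omega
  have hE : ∃ k, (if te ≥ xs.getLast?.getD 0 then some ((xs.length : Int))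
      else if te < xs.headI then none
      else if te = xs.headI then some 1
      else lastAtMost xs te (xs.length : Int)) = some k := by
    by_cases g1 : te ≥ xs.getLast?.getD 0
    · exact ⟨(xs.length : Int), if_pos g1⟩
    by_cases g2 : te < xs.headI
    · exact absurd ⟨g2, hts1, hts2⟩ hc2
    by_cases g3 : te = xs.headI
    · exact ⟨1, by rw [if_neg g1, if_neg g2, if_pos g3]⟩
    · have h0 : (PySem.List.pyGet? xs 0).getD 0 ≤ te := by rw [hfirst]; omega
      have := scanRev_ne_none xs te hne h0
      rw [loops_eq] at this
      rcases hk : lastAtMost xs te (xs.length : Int) with _ | k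
      · exact absurd hk this
      · exact ⟨k, by rw [if_neg g1, if_neg g2, if_neg g3]⟩
  obtain ⟨k, hk⟩ := hE
  simp [h1, h2, h3, hk]

theorem find_start_and_end_index_raises : Claim_raises_find_start_and_end_index := by
  unfold Claim_raises_find_start_and_end_index
  constructor
  · intro xs ts te _ hR hPre
    exact hR.2.elim (fun h => hPre.2.1 h) (fun h => hPre.2.2 h)
  · decide

-- self-check: the raise-witness value as a plain equation (projected from the theorem above)
theorem pvRaiseWitnessCheck_ok :
    find_start_and_end_index_alt [0, 5] 1 3 = pvRaiseWitnessOut_find_start_and_end_index :=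
  find_start_and_end_index_raises.2.2.2
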